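-- pv_equiv track=rewrite | github.com/CS291-Boudaie/priority-queue-tuomaslaukala | week1.py | count_clumps
-- ===== SOURCE A (Python) =====
-- def count_clumps(arr):
--     """
--     Return the number of clumps in the input list.
--     A clump is a series of 2 or more adjacent elements of the same value.
--     """
--     number_of_clumps = 0
--
--     for i in range(len(arr)-1):
--         if i == 0:
--             if arr[i] == arr[i+1]:
--                 number_of_clumps += 1
--         else:
--             if arr[i] == arr[i+1] and arr[i] != arr[i-1]:
--                 number_of_clumps += 1
--
--     return number_of_clumps
-- ===== SOURCE B (Python) =====
-- def count_clumps(arr):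
--     # Run-length encode the list, then count runs of length >= 2.
--     runs = []  # list of (value, length) for each maximal run of equal adjacent elements
--     for x in arr:
--         if runs and runs[-1][0] == x:
--             runs[-1] = (x, runs[-1][1] + 1)
--         else:
--             runs.append((x, 1))
--     return sum(1 for _, k in runs if k >= 2)
-- ===== Notes on version B (the rewrite author's own statement) =====
-- stated objective: alternative
-- what changed: B first builds an explicit run-length encoding of the list (maximal runs of equal adjacent values) and then counts runs of length >= 2, replacing A's index-based neighbour comparisons with their i==0 special case.
import Mathlib
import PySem

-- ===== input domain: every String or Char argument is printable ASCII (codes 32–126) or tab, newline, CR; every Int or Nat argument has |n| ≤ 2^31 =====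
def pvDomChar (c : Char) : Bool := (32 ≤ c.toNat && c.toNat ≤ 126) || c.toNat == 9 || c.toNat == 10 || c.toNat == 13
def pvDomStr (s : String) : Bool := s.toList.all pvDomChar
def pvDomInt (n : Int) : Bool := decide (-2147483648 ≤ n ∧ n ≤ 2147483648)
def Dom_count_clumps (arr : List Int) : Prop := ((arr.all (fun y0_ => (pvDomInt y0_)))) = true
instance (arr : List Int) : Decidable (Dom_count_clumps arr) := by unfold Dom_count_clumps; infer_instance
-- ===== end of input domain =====

-- B builds an explicit run-length encoding and counts runs of length >= 2, instead of A's
-- index-based neighbour comparisons with an i==0 special case (alternative decomposition, same cost).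


-- ===== PORT A =====
def count_clumps (arr : List Int) : Int :=
  (PySem.List.pyRange 0 ((arr.length : Int) - 1) 1).foldl
    (fun acc i =>
      if i = 0 then
        if PySem.List.pyGetD arr i 0 = PySem.List.pyGetD arr (i + 1) 0 then acc + 1 else acc
      else
        if PySem.List.pyGetD arr i 0 = PySem.List.pyGetD arr (i + 1) 0 ∧
           PySem.List.pyGetD arr i 0 ≠ PySem.List.pyGetD arr (i - 1) 0 then acc + 1 else acc)
    0

-- ===== PORT B =====
-- One step of building the run-length encoding; the accumulator holds the runs
-- most-recent-first (Python appends at the end; the final count ignores order, the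
-- port reverses before counting to match the Python list exactly).
def bStep (runs : List (Int × Int)) (x : Int) : List (Int × Int) :=
  match runs with
  | (y, k) :: rest => if x = y then (y, k + 1) :: rest else (x, 1) :: (y, k) :: rest
  | [] => [(x, 1)]

def count_clumps_alt (arr : List Int) : Int :=
  ((arr.foldl bStep []).reverse.countP (fun p => decide (2 ≤ p.2)) : Nat)

-- ===== PRECONDITION & SPEC =====
def Spec_count_clumps (arr : List Int) (out : Int) : Prop := out = count_clumps_alt arr
instance (arr : List Int) (out : Int) : Decidable (Spec_count_clumps arr out) := by unfold Spec_count_clumps; infer_instance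

-- ===== CLAIM (what is proved, stated in full; the proofs are below) =====
def Claim_equal_count_clumps : Prop := ∀ (arr : List Int), Dom_count_clumps arr → Spec_count_clumps arr (count_clumps arr)

-- ===== LEMMAS AND PROOFS =====

-- Reference count: gcnt y c t = number of clumps found scanning t where y is the value of the
-- current run and c says whether that run already has length ≥ 2.
def gcnt (y : Int) (c : Bool) : List Int → Nat
  | [] => 0
  | x :: t => if x = y then (if c then 0 else 1) + gcnt y true t else gcnt x false t

-- A-shaped reference count: aA p x t counts positions i with l[i]=l[i+1] ∧ l[i]≠l[i-1],
-- where p is the previous element, x the current one and t the rest.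
def aA (p x : Int) : List Int → Nat
  | [] => 0
  | y :: t => (if x = y ∧ ¬(x = p) then 1 else 0) + aA x y t

def bScore (rs : List (Int × Int)) : Nat := rs.countP (fun p => decide (2 ≤ p.2))

theorem gcnt_eq_aA : ∀ (t : List Int) (x p : Int), gcnt x (decide (x = p)) t = aA p x t := by
  intro t
  induction t with
  | nil => intro x p; simp [gcnt, aA]
  | cons y t ih =>
    intro x p
    simp only [gcnt, aA]
    by_cases hxy : y = x
    · subst hxy
      have ihx := ih y y
      rw [decide_eq_true (show y = y from rfl)] at ihx
      by_cases hp : y = p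
      · subst hp; simp [ihx]
      · simp [hp, ihx]
    · have ihy := ih y x
      rw [decide_eq_false (show ¬ y = x from hxy)] at ihy
      simp [hxy, ihy]
      intro h
      exact absurd h.symm hxy

theorem bScore_foldl : ∀ (t : List Int) (y k : Int) (rest : List (Int × Int)), 1 ≤ k →
    bScore (t.foldl bStep ((y, k) :: rest)) = bScore ((y, k) :: rest) + gcnt y (decide (2 ≤ k)) t := by
  intro t
  induction t with
  | nil => intro y k rest _; simp [gcnt]
  | cons x t ih =>
    intro y k rest hk
    by_cases hxy : x = y
    · subst hxy
      have hk1 : (1 : Int) ≤ k + 1 := by omega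
      have h2 : (decide (2 ≤ k + 1)) = true := by simp; omega
      have hstep : bStep ((x, k) :: rest) x = (x, k + 1) :: rest := by simp [bStep]
      rw [List.foldl_cons, hstep, ih x (k + 1) rest hk1, h2]
      by_cases h2k : 2 ≤ k
      · simp [bScore, gcnt, h2k, show (2:Int) ≤ k + 1 by omega]
      · have hk1' : k = 1 := by omega
        subst hk1'
        simp [bScore, gcnt]
        omega
    · have hstep : bStep ((y, k) :: rest) x = (x, 1) :: (y, k) :: rest := by simp [bStep, hxy]
      rw [List.foldl_cons, hstep, ih x 1 ((y, k) :: rest) (by omega)]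
      simp [bScore, gcnt, hxy]

theorem alt_eq_gcnt : ∀ (x : Int) (t : List Int),
    count_clumps_alt (x :: t) = (gcnt x false t : Nat) := by
  intro x t
  unfold count_clumps_alt
  rw [List.countP_reverse]
  have : (x :: t).foldl bStep [] = t.foldl bStep [(x, 1)] := by
    simp [bStep]
  rw [this]
  have h := bScore_foldl t x 1 [] (by omega)
  simp only [bScore] at h
  rw [h]
  simp

-- The tail of A's index loop (from index j ≥ 1) counts exactly aA over the suffix.
theorem A_fold_suffix : ∀ (t arr : List Int) (j : Nat) (p x : Int) (acc : Int),
    1 ≤ j → arr.drop (j - 1) = p :: x :: t →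
    (PySem.List.pyRange (j : Int) ((arr.length : Int) - 1) 1).foldl
      (fun acc i =>
        if i = 0 then
          if PySem.List.pyGetD arr i 0 = PySem.List.pyGetD arr (i + 1) 0 then acc + 1 else acc
        else
          if PySem.List.pyGetD arr i 0 = PySem.List.pyGetD arr (i + 1) 0 ∧
             PySem.List.pyGetD arr i 0 ≠ PySem.List.pyGetD arr (i - 1) 0 then acc + 1 else acc)
      acc = acc + (aA p x t : Nat) := by
  intro t
  induction t with
  | nil =>
    intro arr j p x acc hj hd
    have hlen : (arr.drop (j - 1)).length = 2 := by rw [hd]; rfl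
    rw [List.length_drop] at hlen
    have hlen' : arr.length = j + 1 := by omega
    have : ((arr.length : Int) - 1) = (j : Int) := by rw [hlen']; push_cast; ring
    rw [this, PySem.List.pyRange_one_eq_nil (le_refl _)]
    simp [aA]
  | cons y t ih =>
    intro arr j p x acc hj hd
    have hlen : (arr.drop (j - 1)).length = t.length + 3 := by rw [hd]; simp
    rw [List.length_drop] at hlen
    have hjlen : j + 2 + t.length = arr.length := by omega
    have hjlt : (j : Int) < (arr.length : Int) - 1 := by
      have : j + 2 ≤ arr.length := by omega
      omega
    rw [PySem.List.pyRange_one_cons hjlt, List.foldl_cons]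
    have hp' : arr[j - 1]? = some p := by
      have h0 : (List.drop (j - 1) arr)[0]? = some p := by rw [hd]; rfl
      rw [List.getElem?_drop] at h0; simpa using h0
    have hx' : arr[j]? = some x := by
      have h0 : (List.drop (j - 1) arr)[1]? = some x := by rw [hd]; rfl
      rw [List.getElem?_drop] at h0
      rw [show j - 1 + 1 = j by omega] at h0; exact h0
    have hy' : arr[j + 1]? = some y := by
      have h0 : (List.drop (j - 1) arr)[2]? = some y := by rw [hd]; rfl
      rw [List.getElem?_drop] at h0
      rw [show j - 1 + 2 = j + 1 by omega] at h0; exact h0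
    have hgx : PySem.List.pyGetD arr (j : Int) 0 = x := by
      rw [PySem.List.pyGetD_natCast, List.getD_eq_getElem?_getD, hx']; rfl
    have hgy : PySem.List.pyGetD arr ((j : Int) + 1) 0 = y := by
      rw [show ((j : Int) + 1) = ((j + 1 : Nat) : Int) by push_cast; ring,
        PySem.List.pyGetD_natCast, List.getD_eq_getElem?_getD, hy']; rfl
    have hgp : PySem.List.pyGetD arr ((j : Int) - 1) 0 = p := by
      rw [show ((j : Int) - 1) = ((j - 1 : Nat) : Int) by push_cast [hj]; ring,
        PySem.List.pyGetD_natCast, List.getD_eq_getElem?_getD, hp']; rfl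
    have hj0 : ((j : Int) = 0) = False := by simp; omega
    have hd' : arr.drop ((j + 1) - 1) = x :: y :: t := by
      rw [show (j + 1) - 1 = (j - 1) + 1 by omega, ← List.tail_drop, hd]; rfl
    have ihj := fun a => ih arr (j + 1) x y a (by omega) hd'
    push_cast at ihj
    rw [ihj]
    simp only [hj0, if_false, hgx, hgy, hgp]
    by_cases hcond : x = y ∧ ¬(x = p)
    · rw [if_pos hcond]
      have ha : aA p x (y :: t) = (if x = y ∧ ¬(x = p) then 1 else 0) + aA x y t := rfl
      rw [ha, if_pos hcond]
      push_cast; ring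
    · rw [if_neg hcond]
      simp only [aA]
      rw [if_neg hcond]
      push_cast; ring

theorem A_eq_gcnt : ∀ (arr : List Int), count_clumps arr =
    (match arr with
     | [] => 0
     | [_] => 0
     | x :: t => (gcnt x false t : Nat)) := by
  intro arr
  match arr with
  | [] =>
    simp [count_clumps]
  | [x] =>
    simp [count_clumps]
  | x :: y :: t =>
    unfold count_clumps
    have hlen : ((x :: y :: t).length : Int) - 1 = (t.length : Int) + 1 := by simp
    have h0 : (0 : Int) < ((x :: y :: t).length : Int) - 1 := by rw [hlen]; positivity
    rw [PySem.List.pyRange_one_cons h0, List.foldl_cons]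
    have hd : (x :: y :: t).drop (1 - 1) = x :: y :: t := by simp
    have hfold := fun a => A_fold_suffix t (x :: y :: t) 1 x y a (le_refl 1) hd
    have e1 : ((1 : Nat) : Int) = (0 : Int) + 1 := by norm_num
    simp only [e1] at hfold
    have hg0 : PySem.List.pyGetD (x :: y :: t) (0 : Int) 0 = x := by
      simp [PySem.List.pyGetD_zero_cons]
    have hg1 : PySem.List.pyGetD (x :: y :: t) ((0 : Int) + 1) 0 = y := by
      rw [show ((0 : Int) + 1) = ((1 : Nat) : Int) by norm_num, PySem.List.pyGetD_natCast]
      rfl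
    rw [hfold, if_pos rfl, hg0, hg1]
    show _ = ((gcnt x false (y :: t) : Nat) : Int)
    -- gcnt x false (y :: t) = (if x = y then 1 else 0) + aA x y t, via gcnt_eq_aA at p := x + 1
    have hne : (decide (x = x + 1)) = false := by simp
    have hG : gcnt x false (y :: t) = aA (x + 1) x (y :: t) := by
      rw [← gcnt_eq_aA (y :: t) x (x + 1), hne]
    have hA : aA (x + 1) x (y :: t) = (if x = y ∧ ¬(x = x + 1) then 1 else 0) + aA x y t := rfl
    by_cases hxy : x = y
    · rw [if_pos hxy, hG, hA, if_pos ⟨hxy, by omega⟩]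
      push_cast; ring
    · rw [if_neg hxy, hG, hA, if_neg (fun h => hxy h.1)]
      push_cast; ring

-- ===== VERDICT (by name: the statement is the Claim_ definition above) =====
theorem count_clumps_spec : Claim_equal_count_clumps := by
  intro arr _
  unfold Spec_count_clumps
  rw [A_eq_gcnt]
  match arr with
  | [] => rfl
  | [x] => simp [count_clumps_alt, bStep]
  | x :: y :: t => rw [alt_eq_gcnt]
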